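-- pv_equiv track=rewrite | github.com/Aryudesu/ABC | ABC/400_499/431/E.py | calc
-- ===== SOURCE A (Python) =====
-- from collections import deque, defaultdict
--
-- INF = 10**6
--
-- def isInField(H: int, W: int, y: int, x: int) -> bool:
--     return 0 <= x < W and 0 <= y < H
--
-- def calc(H: int, W: int, S:list[str])-> int:
--     # (num, y, x, dy, dx) = S[y][x]にdy, dxの方向から入る このときnumの重さである
--     memo = defaultdict(lambda:INF)
--     data = deque([(0, 0, 0, 0, 1)])
--     while data:
--         n, y, x, dy, dx = data.popleft()
--         if not isInField(H, W, y, x):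
--             continue
--         costA = 1
--         costB = 1
--         costC = 1
--         if S[y][x] == "A":
--             costA = 0
--         elif S[y][x] == "B":
--             costB = 0
--         elif S[y][x] == "C":
--             costC = 0
--         else:
--             raise Exception()
--         dyA, dxA = dy, dx
--         dyB, dxB = dx, dy
--         dyC, dxC = -dx, -dy
--         if costA == 0:
--             if n < memo[(y+dyA, x+dxA, dyA, dxA)]:
--                 data.appendleft((n, y+dyA, x+dxA, dyA, dxA))
--                 memo[(y+dyA, x+dxA, dyA, dxA)] = n
--         else:
--             if n + 1 < memo[(y+dyA, x+dxA, dyA, dxA)]: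
--                 data.append((n + 1, y+dyA, x+dxA, dyA, dxA))
--                 memo[(y+dyA, x+dxA, dyA, dxA)] = n + 1
--         if costB == 0:
--             if n < memo[(y+dyB, x+dxB, dyB, dxB)]:
--                 data.appendleft((n, y+dyB, x+dxB, dyB, dxB))
--                 memo[(y+dyB, x+dxB, dyB, dxB)] = n
--         else:
--             if n + 1 < memo[(y+dyB, x+dxB, dyB, dxB)]:
--                 data.append((n + 1, y+dyB, x+dxB, dyB, dxB))
--                 memo[(y+dyB, x+dxB, dyB, dxB)] = n + 1
--         if costC == 0:
--             if n < memo[(y+dyC, x+dxC, dyC, dxC)]: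
--                 data.appendleft((n, y+dyC, x+dxC, dyC, dxC))
--                 memo[(y+dyC, x+dxC, dyC, dxC)] = n
--         else:
--             if n + 1 < memo[(y+dyC, x+dxC, dyC, dxC)]:
--                 data.append((n + 1, y+dyC, x+dxC, dyC, dxC))
--                 memo[(y+dyC, x+dxC, dyC, dxC)] = n + 1
--     return memo[(H-1, W, 0, 1)]
-- ===== SOURCE B (Python) =====
-- import heapq
--
-- INF = 10**6
--
-- def isInField(H: int, W: int, y: int, x: int) -> bool:
--     return 0 <= x < W and 0 <= y < H
--
-- def calc(H: int, W: int, S: list[str]) -> int: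
--     # Dijkstra with a heap over states (y, x, dy, dx); dist recorded at push time.
--     dist = {}
--     heap = [(0, 0, 0, 0, 1)]
--     while heap:
--         n, y, x, dy, dx = heapq.heappop(heap)
--         if not isInField(H, W, y, x):
--             continue
--         if n > dist.get((y, x, dy, dx), INF):
--             continue  # stale entry
--         ch = S[y][x]
--         if ch == "A":
--             cA, cB, cC = 0, 1, 1
--         elif ch == "B":
--             cA, cB, cC = 1, 0, 1
--         elif ch == "C":
--             cA, cB, cC = 1, 1, 0
--         else:
--             raise Exception()
--         for c, ny, nx, ndy, ndx in ((cA, y + dy, x + dx, dy, dx),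
--                                     (cB, y + dx, x + dy, dx, dy),
--                                     (cC, y - dx, x - dy, -dx, -dy)):
--             nd = n + c
--             if nd < dist.get((ny, nx, ndy, ndx), INF):
--                 dist[(ny, nx, ndy, ndx)] = nd
--                 heapq.heappush(heap, (nd, ny, nx, ndy, ndx))
--     return dist.get((H - 1, W, 0, 1), INF)
-- ===== Notes on version B (the rewrite author's own statement) =====
-- stated objective: idiomatic
-- what changed: Replaces the 0-1 BFS (deque with appendleft/append and reprocessing of stale entries) by the standard heapq Dijkstra with lazy deletion: dist dict updated at push time, pop the smallest (cost,state) tuple, skip stale pops.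
import Mathlib
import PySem

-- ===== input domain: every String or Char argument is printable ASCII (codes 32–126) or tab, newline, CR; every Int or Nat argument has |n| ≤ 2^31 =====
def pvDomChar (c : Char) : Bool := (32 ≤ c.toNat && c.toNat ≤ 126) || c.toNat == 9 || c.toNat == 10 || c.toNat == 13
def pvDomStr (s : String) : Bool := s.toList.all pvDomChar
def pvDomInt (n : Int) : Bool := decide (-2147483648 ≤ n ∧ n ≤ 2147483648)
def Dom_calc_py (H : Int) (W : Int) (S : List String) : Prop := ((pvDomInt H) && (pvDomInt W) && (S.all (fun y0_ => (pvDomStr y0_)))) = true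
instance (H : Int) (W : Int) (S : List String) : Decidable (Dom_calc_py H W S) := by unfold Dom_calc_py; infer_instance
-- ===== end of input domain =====

-- B replaces A's 0-1 BFS deque by a heapq Dijkstra with lazy deletion (different worklist
-- algorithm, same exact result); the equivalence is proved by showing both final distance maps
-- are sound and stable labellings of the same move graph, hence identical.

-- ===== PORT A =====
-- state (y, x, dy, dx); entry (cost, state); memo is the Python defaultdict (default pvINF)
abbrev PvState := Int × Int × Int × Int
abbrev PvEntry := Int × PvState
abbrev PvMemo := PySem.Dict PvState Int

def pvINF : Int := 1000000

def pvInField (H W y x : Int) : Bool := decide (0 ≤ x ∧ x < W ∧ 0 ≤ y ∧ y < H)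

-- S[y][x] : none models the IndexError case (excluded by Pre_)
def pvLetter (S : List String) (y x : Int) : Option Char :=
  (PySem.List.pyGet? S y).bind (fun row => PySem.Str.pyGet? row x)

-- the costA/costB/costC if-elif chain; none models the `raise Exception()` branch
def pvCosts (ch : Char) : Option (Int × Int × Int) :=
  if ch = 'A' then some (0, 1, 1)
  else if ch = 'B' then some (1, 0, 1)
  else if ch = 'C' then some (1, 1, 0)
  else none

-- the three moves with their costs, in source order (straight, swap, reverse)
def pvSuccs (cs : Int × Int × Int) (y x dy dx : Int) : List (Int × PvState) :=
  [(cs.1, (y + dy, x + dx, dy, dx)),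
   (cs.2.1, (y + dx, x + dy, dx, dy)),
   (cs.2.2, (y - dx, x - dy, -dx, -dy))]

-- one of A's three relax blocks: cost-0 pushes appendleft (front), cost-1 appends (back)
def pvRelaxA (q : List PvEntry) (m : PvMemo) (n c : Int) (t : PvState) : List PvEntry × PvMemo :=
  if n + c < m.getD t pvINF then
    ((if c = 0 then (n + c, t) :: q else q ++ [(n + c, t)]), m.insert t (n + c))
  else (q, m)

-- A's three relax blocks in source order (straight, swap, reverse)
def pvRelax3A (q : List PvEntry) (m : PvMemo) (n : Int) (cs : Int × Int × Int) (y x dy dx : Int) :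
    List PvEntry × PvMemo :=
  let p1 := pvRelaxA q m n cs.1 (y + dy, x + dx, dy, dx)
  let p2 := pvRelaxA p1.1 p1.2 n cs.2.1 (y + dx, x + dy, dx, dy)
  pvRelaxA p2.1 p2.2 n cs.2.2 (y - dx, x - dy, -dx, -dy)

-- the while loop; fuel is a guard only (proved sufficient below), queue head = deque front
def pvRunA (H W : Int) (S : List String) : Nat → List PvEntry → PvMemo → PvMemo
  | 0, _, m => m
  | _ + 1, [], m => m
  | f + 1, (n, y, x, dy, dx) :: rest, m =>
    if pvInField H W y x then
      match (pvLetter S y x).bind pvCosts with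
      | none => m
      | some cs => pvRunA H W S f (pvRelax3A rest m n cs y x dy dx).1 (pvRelax3A rest m n cs y x dy dx).2
    else pvRunA H W S f rest m

def pvFuel (H W : Int) : Nat := 9 * (H + 2).toNat * (W + 2).toNat * 1000000 + 2

def calc_py (H : Int) (W : Int) (S : List String) : Int :=
  (pvRunA H W S (pvFuel H W) [(0, (0, 0, 0, 1))] PySem.Dict.empty).getD (H - 1, W, 0, 1) pvINF

-- ===== PORT B =====
-- heapq modeled as a plain list: heappush = cons, heappop = remove the lexicographically
-- least tuple (exact for heapq's pop-smallest contract on (n, y, x, dy, dx) tuples)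
def pvEntLt (a b : PvEntry) : Bool :=
  if a.1 < b.1 then true else if b.1 < a.1 then false
  else if a.2.1 < b.2.1 then true else if b.2.1 < a.2.1 then false
  else if a.2.2.1 < b.2.2.1 then true else if b.2.2.1 < a.2.2.1 then false
  else if a.2.2.2.1 < b.2.2.2.1 then true else if b.2.2.2.1 < a.2.2.2.1 then false
  else a.2.2.2.2 < b.2.2.2.2

def pvMinEntry (e : PvEntry) (l : List PvEntry) : PvEntry :=
  l.foldl (fun acc f => if pvEntLt f acc then f else acc) e

-- B's inner for-loop body: relax one move, recording dist at push time
def pvRelaxB (n : Int) (acc : List PvEntry × PvMemo) (ct : Int × PvState) : List PvEntry × PvMemo :=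
  if n + ct.1 < acc.2.getD ct.2 pvINF then
    ((n + ct.1, ct.2) :: acc.1, acc.2.insert ct.2 (n + ct.1))
  else acc

def pvRunB (H W : Int) (S : List String) : Nat → List PvEntry → PvMemo → PvMemo
  | 0, _, m => m
  | _ + 1, [], m => m
  | f + 1, e :: rest, m =>
    let mn := pvMinEntry e rest
    let q' := (e :: rest).erase mn
    if pvInField H W mn.2.1 mn.2.2.1 then
      if m.getD mn.2 pvINF < mn.1 then pvRunB H W S f q' m   -- stale entry, skip
      else
        match (pvLetter S mn.2.1 mn.2.2.1).bind pvCosts with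
        | none => m
        | some cs =>
          let p := (pvSuccs cs mn.2.1 mn.2.2.1 mn.2.2.2.1 mn.2.2.2.2).foldl (pvRelaxB mn.1) (q', m)
          pvRunB H W S f p.1 p.2
    else pvRunB H W S f q' m

def calc_py_alt (H : Int) (W : Int) (S : List String) : Int :=
  (pvRunB H W S (pvFuel H W) [(0, (0, 0, 0, 1))] PySem.Dict.empty).getD (H - 1, W, 0, 1) pvINF

-- ===== PRECONDITION & SPEC =====
-- Pre_ excludes exactly the inputs where A raises: some in-field cell (y < H, x < W) is
-- missing (IndexError) or holds a letter other than A/B/C (`raise Exception()`).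
def Pre_calc_py (H : Int) (W : Int) (S : List String) : Prop :=
  H ≤ 0 ∨ W ≤ 0 ∨
    (H ≤ (S.length : Int) ∧
      ∀ y ∈ List.range H.toNat,
        W ≤ ((S.getD y "").toList.length : Int) ∧
        ∀ x ∈ List.range W.toNat,
          (S.getD y "").toList.getD x ' ' ∈ (['A', 'B', 'C'] : List Char))
instance (H : Int) (W : Int) (S : List String) : Decidable (Pre_calc_py H W S) := by
  unfold Pre_calc_py; infer_instance

def pvWitness_calc_py : Int × Int × List String := (1, 1, ["A"])

def Spec_calc_py (H : Int) (W : Int) (S : List String) (out : Int) : Prop := out = calc_py_alt H W S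
instance (H : Int) (W : Int) (S : List String) (out : Int) : Decidable (Spec_calc_py H W S out) := by unfold Spec_calc_py; infer_instance

-- ===== CLAIM (what is proved, stated in full; the proofs are below) =====
def Claim_equal_calc_py : Prop := ∀ (H : Int) (W : Int) (S : List String), Dom_calc_py H W S → Pre_calc_py H W S → Spec_calc_py H W S (calc_py H W S)

-- ===== LEMMAS AND PROOFS =====

-- ---- graph-side notions ----
def pvStart : PvState := (0, 0, 0, 1)

def pvStepR (H W : Int) (S : List String) (s : PvState) (c : Int) (t : PvState) : Prop :=
  pvInField H W s.1 s.2.1 = true ∧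
  ∃ cs, (pvLetter S s.1 s.2.1).bind pvCosts = some cs ∧
        (c, t) ∈ pvSuccs cs s.1 s.2.1 s.2.2.1 s.2.2.2

inductive pvWalk (H W : Int) (S : List String) : PvState → Int → Prop
  | nil : pvWalk H W S pvStart 0
  | cons {s n c t} : pvWalk H W S s n → pvStepR H W S s c t → pvWalk H W S t (n + c)

noncomputable def pvLbl (m : PvMemo) (s : PvState) : Int :=
  min (m.getD s pvINF) (if s = pvStart then 0 else pvINF)

def pvStable (H W : Int) (S : List String) (m : PvMemo) : Prop :=
  ∀ s c t, pvStepR H W S s c t → m.getD t pvINF ≤ pvLbl m s + c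

def pvSoundM (H W : Int) (S : List String) (m : PvMemo) : Prop :=
  ∀ t v, m.get? t = some v →
    0 ≤ v ∧ v < pvINF ∧ ∃ s n c, pvWalk H W S s n ∧ pvStepR H W S s c t ∧ v = n + c

def pvDirOK (s : PvState) : Prop :=
  -1 ≤ s.2.2.1 ∧ s.2.2.1 ≤ 1 ∧ -1 ≤ s.2.2.2 ∧ s.2.2.2 ≤ 1

def pvGoodQ (H W : Int) (S : List String) (q : List PvEntry) : Prop :=
  ∀ e ∈ q, 0 ≤ e.1 ∧ e.1 < pvINF ∧ pvDirOK e.2 ∧ pvWalk H W S e.2 e.1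

def pvOblig (H W : Int) (S : List String) (q : List PvEntry) (m : PvMemo) : Prop :=
  ∀ s c t, pvStepR H W S s c t →
    (m.getD t pvINF ≤ pvLbl m s + c ∨ ∃ n, (n, s) ∈ q ∧ n ≤ pvLbl m s)

def pvInv (H W : Int) (S : List String) (q : List PvEntry) (m : PvMemo) : Prop :=
  pvGoodQ H W S q ∧ pvSoundM H W S m ∧ pvOblig H W S q m

def pvEnds (H W : Int) (S : List String) (m : PvMemo) : Prop :=
  pvStable H W S m ∧ pvSoundM H W S m

-- ---- the potential ----
noncomputable def pvBox (H W : Int) : Finset PvState :=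
  Finset.Icc (-1) H ×ˢ Finset.Icc (-1) W ×ˢ Finset.Icc (-1) 1 ×ˢ Finset.Icc (-1) 1

noncomputable def pvPhi (H W : Int) (q : List PvEntry) (m : PvMemo) : Nat :=
  (∑ s ∈ pvBox H W, (m.getD s pvINF).toNat) + q.length

-- ---- generic one-relax / chain description shared by both ports ----
def PvRelStep (n c : Int) (t : PvState) (q : List PvEntry) (m : PvMemo)
    (q' : List PvEntry) (m' : PvMemo) : Prop :=
  (n + c < m.getD t pvINF ∧ m' = m.insert t (n + c) ∧
     (∀ e, e ∈ q' ↔ e = (n + c, t) ∨ e ∈ q) ∧ q'.length = q.length + 1) ∨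
  (¬ n + c < m.getD t pvINF ∧ q' = q ∧ m' = m)

def PvRelChain (n : Int) : List (Int × PvState) → List PvEntry → PvMemo → List PvEntry → PvMemo → Prop
  | [], q, m, q', m' => q' = q ∧ m' = m
  | e :: es, q, m, q', m' =>
      ∃ q1 m1, PvRelStep n e.1 e.2 q m q1 m1 ∧ PvRelChain n es q1 m1 q' m'

lemma chain_nil (n : Int) (q : List PvEntry) (m : PvMemo) : PvRelChain n [] q m q m := ⟨rfl, rfl⟩

lemma chain_cons {n : Int} {e : Int × PvState} {es : List (Int × PvState)}
    {q : List PvEntry} {m : PvMemo} {q1 : List PvEntry} {m1 : PvMemo}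
    {q' : List PvEntry} {m' : PvMemo}
    (h1 : PvRelStep n e.1 e.2 q m q1 m1) (h2 : PvRelChain n es q1 m1 q' m') :
    PvRelChain n (e :: es) q m q' m' := ⟨q1, m1, h1, h2⟩

lemma pvRelaxA_relStep (q : List PvEntry) (m : PvMemo) (n c : Int) (t : PvState) :
    PvRelStep n c t q m (pvRelaxA q m n c t).1 (pvRelaxA q m n c t).2 := by
  unfold pvRelaxA PvRelStep
  split_ifs with h hc
  · refine Or.inl ⟨h, by simp, ?_, by simp⟩
    intro e; simp [List.mem_cons]
  · refine Or.inl ⟨h, by simp, ?_, by simp⟩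
    intro e; simp [List.mem_append, or_comm]
  · exact Or.inr ⟨h, rfl, rfl⟩

lemma pvRelaxB_relStep (q : List PvEntry) (m : PvMemo) (n : Int) (ct : Int × PvState) :
    PvRelStep n ct.1 ct.2 q m (pvRelaxB n (q, m) ct).1 (pvRelaxB n (q, m) ct).2 := by
  unfold pvRelaxB PvRelStep
  split_ifs with h
  · refine Or.inl ⟨h, by simp, ?_, by simp⟩
    intro e; simp [List.mem_cons]
  · exact Or.inr ⟨h, rfl, rfl⟩

lemma pvChainA (n : Int) (cs : Int × Int × Int) (y x dy dx : Int) (q : List PvEntry) (m : PvMemo) :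
    PvRelChain n (pvSuccs cs y x dy dx) q m
      (pvRelax3A q m n cs y x dy dx).1 (pvRelax3A q m n cs y x dy dx).2 := by
  unfold pvRelax3A pvSuccs
  exact chain_cons (pvRelaxA_relStep _ _ _ _ _)
    (chain_cons (pvRelaxA_relStep _ _ _ _ _)
      (chain_cons (pvRelaxA_relStep _ _ _ _ _) (chain_nil _ _ _)))

lemma pvChainB (n : Int) (cs : Int × Int × Int) (y x dy dx : Int) (q : List PvEntry) (m : PvMemo) :
    PvRelChain n (pvSuccs cs y x dy dx) q m
      ((pvSuccs cs y x dy dx).foldl (pvRelaxB n) (q, m)).1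
      ((pvSuccs cs y x dy dx).foldl (pvRelaxB n) (q, m)).2 := by
  simp only [pvSuccs, List.foldl]
  exact chain_cons (pvRelaxB_relStep _ _ _ _)
    (chain_cons (pvRelaxB_relStep _ _ _ _)
      (chain_cons (pvRelaxB_relStep _ _ _ _) (chain_nil _ _ _)))

-- ---- one-relax consequences ----
lemma relstep_mono {n c : Int} {t : PvState} {q : List PvEntry} {m : PvMemo}
    {q' : List PvEntry} {m' : PvMemo} (h : PvRelStep n c t q m q' m') :
    ∀ u, m'.getD u pvINF ≤ m.getD u pvINF := by
  intro u
  rcases h with ⟨hlt, hm, _, _⟩ | ⟨_, _, hm⟩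
  · subst hm; rw [PySem.Dict.getD_insert]
    split_ifs with he
    · subst he; exact le_of_lt hlt
    · exact le_refl _
  · subst hm; exact le_refl _

lemma relstep_floor {n c : Int} {t : PvState} {q : List PvEntry} {m : PvMemo}
    {q' : List PvEntry} {m' : PvMemo} (hc : 0 ≤ c) (h : PvRelStep n c t q m q' m') :
    ∀ u, min n (m.getD u pvINF) ≤ m'.getD u pvINF := by
  intro u
  rcases h with ⟨hlt, hm, _, _⟩ | ⟨_, _, hm⟩
  · subst hm; rw [PySem.Dict.getD_insert]
    split_ifs with he
    · calc min n (m.getD u pvINF) ≤ n := min_le_left _ _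
        _ ≤ n + c := by omega
    · exact min_le_right _ _
  · subst hm; exact min_le_right _ _

lemma relstep_qsub {n c : Int} {t : PvState} {q : List PvEntry} {m : PvMemo}
    {q' : List PvEntry} {m' : PvMemo} (h : PvRelStep n c t q m q' m') :
    ∀ e ∈ q, e ∈ q' := by
  intro e he
  rcases h with ⟨_, _, hq, _⟩ | ⟨_, hq, _⟩
  · exact (hq e).mpr (Or.inr he)
  · subst hq; exact he

lemma relstep_push_change {n c : Int} {t : PvState} {q : List PvEntry} {m : PvMemo}
    {q' : List PvEntry} {m' : PvMemo} (h : PvRelStep n c t q m q' m') :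
    ∀ u, m'.getD u pvINF ≠ m.getD u pvINF → (m'.getD u pvINF, u) ∈ q' := by
  intro u hne
  rcases h with ⟨hlt, hm, hq, _⟩ | ⟨_, _, hm⟩
  · subst hm
    rw [PySem.Dict.getD_insert] at hne ⊢
    split_ifs at hne ⊢ with he
    · subst he; exact (hq _).mpr (Or.inl rfl)
    · exact absurd rfl hne
  · subst hm; exact absurd rfl hne

lemma relstep_post {n c : Int} {t : PvState} {q : List PvEntry} {m : PvMemo}
    {q' : List PvEntry} {m' : PvMemo} (h : PvRelStep n c t q m q' m') :
    m'.getD t pvINF ≤ n + c := by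
  rcases h with ⟨hlt, hm, _, _⟩ | ⟨hge, _, hm⟩
  · subst hm; rw [PySem.Dict.getD_insert]; simp
  · subst hm; omega

lemma relstep_qmem {n c : Int} {t : PvState} {q : List PvEntry} {m : PvMemo}
    {q' : List PvEntry} {m' : PvMemo} (h : PvRelStep n c t q m q' m') :
    ∀ e ∈ q', e ∈ q ∨ (e = (n + c, t) ∧ n + c < m.getD t pvINF) := by
  intro e he
  rcases h with ⟨hlt, _, hq, _⟩ | ⟨_, hq, _⟩
  · rcases (hq e).mp he with he' | he'
    · exact Or.inr ⟨he', hlt⟩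
    · exact Or.inl he'
  · subst hq; exact Or.inl he

lemma relstep_store {n c : Int} {t : PvState} {q : List PvEntry} {m : PvMemo}
    {q' : List PvEntry} {m' : PvMemo} (h : PvRelStep n c t q m q' m') :
    ∀ u v, m'.get? u = some v → m.get? u = some v ∨ (u = t ∧ v = n + c ∧ n + c < m.getD t pvINF) := by
  intro u v hv
  rcases h with ⟨hlt, hm, _, _⟩ | ⟨_, _, hm⟩
  · subst hm; rw [PySem.Dict.get?_insert] at hv
    split_ifs at hv with he
    · exact Or.inr ⟨he, (Option.some_inj.mp hv).symm, hlt⟩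
    · exact Or.inl hv
  · subst hm; exact Or.inl hv

lemma relstep_phi {H W : Int} {n c : Int} {t : PvState} {q : List PvEntry} {m : PvMemo}
    {q' : List PvEntry} {m' : PvMemo} (hn : 0 ≤ n) (hc : 0 ≤ c) (ht : t ∈ pvBox H W)
    (h : PvRelStep n c t q m q' m') : pvPhi H W q' m' ≤ pvPhi H W q m := by
  rcases h with ⟨hlt, hm, _, hlen⟩ | ⟨_, hq, hm⟩
  · subst hm
    have hsum : (∑ s ∈ pvBox H W, ((m.insert t (n + c)).getD s pvINF).toNat) <
        ∑ s ∈ pvBox H W, (m.getD s pvINF).toNat := by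
      apply Finset.sum_lt_sum
      · intro i _
        rw [PySem.Dict.getD_insert]
        split_ifs with he
        · subst he; omega
        · exact le_refl _
      · exact ⟨t, ht, by rw [PySem.Dict.getD_insert]; simp; omega⟩
    unfold pvPhi; omega
  · subst hq; subst hm; exact le_refl _

-- ---- chain consequences ----
lemma chain_mono {n : Int} {es : List (Int × PvState)} :
    ∀ {q : List PvEntry} {m : PvMemo} {q' : List PvEntry} {m' : PvMemo},
      PvRelChain n es q m q' m' → ∀ u, m'.getD u pvINF ≤ m.getD u pvINF := by
  induction es with
  | nil => intro q m q' m' h u; obtain ⟨_, hm⟩ := h; subst hm; exact le_refl _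
  | cons e es ih =>
    intro q m q' m' h u
    obtain ⟨q1, m1, hs, hr⟩ := h
    exact le_trans (ih hr u) (relstep_mono hs u)

lemma chain_floor {n : Int} {es : List (Int × PvState)} (hes : ∀ p ∈ es, 0 ≤ p.1) :
    ∀ {q : List PvEntry} {m : PvMemo} {q' : List PvEntry} {m' : PvMemo},
      PvRelChain n es q m q' m' → ∀ u, min n (m.getD u pvINF) ≤ m'.getD u pvINF := by
  induction es with
  | nil => intro q m q' m' h u; obtain ⟨_, hm⟩ := h; subst hm; exact min_le_right _ _
  | cons e es ih =>
    intro q m q' m' h u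
    obtain ⟨q1, m1, hs, hr⟩ := h
    have h1 := relstep_floor (hes e List.mem_cons_self) hs u
    have h2 := ih (fun p hp => hes p (List.mem_cons_of_mem _ hp)) hr u
    have : min n (m.getD u pvINF) ≤ min n (m1.getD u pvINF) := by omega
    omega

lemma chain_qsub {n : Int} {es : List (Int × PvState)} :
    ∀ {q : List PvEntry} {m : PvMemo} {q' : List PvEntry} {m' : PvMemo},
      PvRelChain n es q m q' m' → ∀ e ∈ q, e ∈ q' := by
  induction es with
  | nil => intro q m q' m' h e he; obtain ⟨hq, _⟩ := h; subst hq; exact he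
  | cons e' es ih =>
    intro q m q' m' h e he
    obtain ⟨q1, m1, hs, hr⟩ := h
    exact ih hr e (relstep_qsub hs e he)

lemma chain_push_change {n : Int} {es : List (Int × PvState)} :
    ∀ {q : List PvEntry} {m : PvMemo} {q' : List PvEntry} {m' : PvMemo},
      PvRelChain n es q m q' m' →
      ∀ u, m'.getD u pvINF ≠ m.getD u pvINF → (m'.getD u pvINF, u) ∈ q' := by
  induction es with
  | nil => intro q m q' m' h u hne; obtain ⟨_, hm⟩ := h; subst hm; exact absurd rfl hne
  | cons e es ih =>
    intro q m q' m' h u hne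
    obtain ⟨q1, m1, hs, hr⟩ := h
    by_cases h1 : m'.getD u pvINF = m1.getD u pvINF
    · rw [h1] at hne ⊢
      exact chain_qsub hr _ (relstep_push_change hs u hne)
    · exact ih hr u h1

lemma chain_post {n : Int} {es : List (Int × PvState)} :
    ∀ {q : List PvEntry} {m : PvMemo} {q' : List PvEntry} {m' : PvMemo},
      PvRelChain n es q m q' m' → ∀ p ∈ es, m'.getD p.2 pvINF ≤ n + p.1 := by
  induction es with
  | nil => intro q m q' m' _ p hp; exact absurd hp (List.not_mem_nil)
  | cons e es ih =>
    intro q m q' m' h p hp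
    obtain ⟨q1, m1, hs, hr⟩ := h
    rcases List.mem_cons.mp hp with h' | h'
    · subst h'; exact le_trans (chain_mono hr p.2) (relstep_post hs)
    · exact ih hr p h'

lemma chain_qmem {n : Int} {es : List (Int × PvState)} :
    ∀ {q : List PvEntry} {m : PvMemo} {q' : List PvEntry} {m' : PvMemo},
      PvRelChain n es q m q' m' → (∀ u, m.getD u pvINF ≤ pvINF) →
      ∀ e ∈ q', e ∈ q ∨ ∃ p ∈ es, e = (n + p.1, p.2) ∧ n + p.1 < pvINF := by
  induction es with
  | nil => intro q m q' m' h _ e he; obtain ⟨hq, _⟩ := h; subst hq; exact Or.inl he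
  | cons e' es ih =>
    intro q m q' m' h hb e he
    obtain ⟨q1, m1, hs, hr⟩ := h
    have hb1 : ∀ u, m1.getD u pvINF ≤ pvINF := fun u => le_trans (relstep_mono hs u) (hb u)
    rcases ih hr hb1 e he with h1 | ⟨p, hp, hep, hlt⟩
    · rcases relstep_qmem hs e h1 with h2 | ⟨hep, hlt⟩
      · exact Or.inl h2
      · exact Or.inr ⟨e', List.mem_cons_self, hep, lt_of_lt_of_le hlt (hb _)⟩
    · exact Or.inr ⟨p, List.mem_cons_of_mem _ hp, hep, hlt⟩

lemma chain_store {n : Int} {es : List (Int × PvState)} :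
    ∀ {q : List PvEntry} {m : PvMemo} {q' : List PvEntry} {m' : PvMemo},
      PvRelChain n es q m q' m' → (∀ u, m.getD u pvINF ≤ pvINF) →
      ∀ t v, m'.get? t = some v →
        m.get? t = some v ∨ ∃ p ∈ es, p.2 = t ∧ v = n + p.1 ∧ v < pvINF := by
  induction es with
  | nil => intro q m q' m' h _ t v hv; obtain ⟨_, hm⟩ := h; subst hm; exact Or.inl hv
  | cons e es ih =>
    intro q m q' m' h hb t v hv
    obtain ⟨q1, m1, hs, hr⟩ := h
    have hb1 : ∀ u, m1.getD u pvINF ≤ pvINF := fun u => le_trans (relstep_mono hs u) (hb u)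
    rcases ih hr hb1 t v hv with h1 | ⟨p, hp, h2, h3, h4⟩
    · rcases relstep_store hs t v h1 with h2 | ⟨ht, hvv, hlt⟩
      · exact Or.inl h2
      · exact Or.inr ⟨e, List.mem_cons_self, ht.symm, hvv, by subst hvv; exact lt_of_lt_of_le hlt (hb _)⟩
    · exact Or.inr ⟨p, List.mem_cons_of_mem _ hp, h2, h3, h4⟩

lemma chain_phi (H W : Int) {n : Int} (hn : 0 ≤ n) {es : List (Int × PvState)}
    (hes : ∀ p ∈ es, 0 ≤ p.1 ∧ p.2 ∈ pvBox H W) :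
    ∀ {q : List PvEntry} {m : PvMemo} {q' : List PvEntry} {m' : PvMemo},
      PvRelChain n es q m q' m' → pvPhi H W q' m' ≤ pvPhi H W q m := by
  induction es with
  | nil => intro q m q' m' h; obtain ⟨hq, hm⟩ := h; subst hq; subst hm; exact le_refl _
  | cons e es ih =>
    intro q m q' m' h
    obtain ⟨q1, m1, hs, hr⟩ := h
    have h1 := relstep_phi hn (hes e List.mem_cons_self).1 (hes e List.mem_cons_self).2 hs
    have h2 := ih (fun p hp => hes p (List.mem_cons_of_mem _ hp)) hr
    omega

-- ---- pop specification (covers A's popleft and B's pop-min) ----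
def PvPop (q : List PvEntry) (e : PvEntry) (q' : List PvEntry) : Prop :=
  e ∈ q ∧ (∀ f ∈ q', f ∈ q) ∧ (∀ f ∈ q, f = e ∨ f ∈ q') ∧ q'.length + 1 = q.length

lemma pvPop_head (e : PvEntry) (rest : List PvEntry) : PvPop (e :: rest) e rest := by
  refine ⟨List.mem_cons_self, fun f hf => List.mem_cons_of_mem _ hf, ?_, rfl⟩
  intro f hf; rcases List.mem_cons.mp hf with h | h
  · exact Or.inl h
  · exact Or.inr h

lemma pvMinEntry_mem (l : List PvEntry) : ∀ e, pvMinEntry e l ∈ e :: l := by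
  induction l with
  | nil => intro e; simp [pvMinEntry]
  | cons a l ih =>
    intro e
    have h : pvMinEntry e (a :: l) = pvMinEntry (if pvEntLt a e then a else e) l := rfl
    rw [h]
    rcases List.mem_cons.mp (ih (if pvEntLt a e then a else e)) with h1 | h1
    · rw [h1]; split_ifs <;> simp
    · simp [h1]

lemma pvPop_min (e : PvEntry) (rest : List PvEntry) :
    PvPop (e :: rest) (pvMinEntry e rest) ((e :: rest).erase (pvMinEntry e rest)) := by
  have hmem : pvMinEntry e rest ∈ e :: rest := pvMinEntry_mem rest e
  refine ⟨hmem, fun f hf => List.mem_of_mem_erase hf, ?_, ?_⟩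
  · intro f hf
    by_cases hfe : f = pvMinEntry e rest
    · exact Or.inl hfe
    · exact Or.inr ((List.mem_erase_of_ne hfe).mpr hf)
  · have := List.length_erase_of_mem hmem
    simp only [this]; simp

-- ---- Pre_ gives letters on in-field cells ----
lemma pvCosts_shape (ch : Char) (cs : Int × Int × Int) (h : pvCosts ch = some cs) :
    cs = (0,1,1) ∨ cs = (1,0,1) ∨ cs = (1,1,0) := by
  unfold pvCosts at h
  split_ifs at h <;> simp_all

lemma bind_costs_shape (S : List String) (y x : Int) (cs : Int × Int × Int)
    (h : (pvLetter S y x).bind pvCosts = some cs) :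
    cs = (0,1,1) ∨ cs = (1,0,1) ∨ cs = (1,1,0) := by
  rcases Option.bind_eq_some_iff.mp h with ⟨ch, _, h2⟩
  exact pvCosts_shape ch cs h2

lemma pre_letter (H W : Int) (S : List String) (hP : Pre_calc_py H W S) (y x : Int)
    (hin : pvInField H W y x = true) :
    ∃ cs, (pvLetter S y x).bind pvCosts = some cs ∧
      (cs = (0,1,1) ∨ cs = (1,0,1) ∨ cs = (1,1,0)) := by
  have hin' : 0 ≤ x ∧ x < W ∧ 0 ≤ y ∧ y < H := by
    simpa [pvInField] using hin
  obtain ⟨hx0, hxW, hy0, hyH⟩ := hin'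
  rcases hP with h | h | ⟨hlen, hrows⟩
  · omega
  · omega
  · obtain ⟨yn, rfl⟩ : ∃ yn : Nat, y = (yn : Int) := ⟨y.toNat, by omega⟩
    obtain ⟨xn, rfl⟩ : ∃ xn : Nat, x = (xn : Int) := ⟨x.toNat, by omega⟩
    obtain ⟨hrW, hchars⟩ := hrows yn (by rw [List.mem_range]; omega)
    have hch := hchars xn (by rw [List.mem_range]; omega)
    simp only [List.mem_cons, List.not_mem_nil, or_false] at hch
    set row := S.getD yn ""
    have hylen : yn < S.length := by omega
    have hxlen : xn < row.toList.length := by omega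
    have hrow : pvLetter S (yn : Int) (xn : Int) = some (row.toList.getD xn ' ') := by
      unfold pvLetter
      rw [PySem.List.pyGet?_natCast, List.getElem?_eq_getElem hylen]
      have hrr : S[yn] = row := (List.getD_eq_getElem S "" hylen).symm
      rw [hrr, Option.bind_some, PySem.Str.pyGet?_natCast, List.getElem?_eq_getElem hxlen]
      exact congrArg some (List.getD_eq_getElem row.toList ' ' hxlen).symm
    rcases hch with h | h | h
    · exact ⟨(0,1,1), by rw [hrow, Option.bind_some, h]; simp [pvCosts], Or.inl rfl⟩
    · exact ⟨(1,0,1), by rw [hrow, Option.bind_some, h]; simp [pvCosts], Or.inr (Or.inl rfl)⟩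
    · exact ⟨(1,1,0), by rw [hrow, Option.bind_some, h]; simp [pvCosts], Or.inr (Or.inr rfl)⟩

lemma succs_costs (cs : Int × Int × Int) (hcs : cs = (0,1,1) ∨ cs = (1,0,1) ∨ cs = (1,1,0))
    (y x dy dx : Int) : ∀ p ∈ pvSuccs cs y x dy dx, 0 ≤ p.1 := by
  intro p hp
  rcases hcs with h | h | h <;> subst h <;>
    simp only [pvSuccs, List.mem_cons, List.not_mem_nil, or_false] at hp <;>
    rcases hp with h | h | h <;> rw [h] <;> norm_num

lemma succs_box (H W : Int) (cs : Int × Int × Int) (y x dy dx : Int)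
    (hin : pvInField H W y x = true) (hd : pvDirOK (y, x, dy, dx)) :
    ∀ p ∈ pvSuccs cs y x dy dx, p.2 ∈ pvBox H W := by
  have hin' : 0 ≤ x ∧ x < W ∧ 0 ≤ y ∧ y < H := by simpa [pvInField] using hin
  obtain ⟨h1, h2, h3, h4⟩ : -1 ≤ dy ∧ dy ≤ 1 ∧ -1 ≤ dx ∧ dx ≤ 1 := hd
  intro p hp
  simp only [pvSuccs, List.mem_cons, List.not_mem_nil, or_false] at hp
  rcases hp with h | h | h <;> rw [h] <;>
    simp only [pvBox, Finset.mem_product, Finset.mem_Icc] <;>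
    refine ⟨by omega, by omega, by omega, by omega⟩

lemma succs_dirOK (cs : Int × Int × Int) (y x dy dx : Int) (hd : pvDirOK (y, x, dy, dx)) :
    ∀ p ∈ pvSuccs cs y x dy dx, pvDirOK p.2 := by
  obtain ⟨h1, h2, h3, h4⟩ : -1 ≤ dy ∧ dy ≤ 1 ∧ -1 ≤ dx ∧ dx ≤ 1 := hd
  intro p hp
  simp only [pvSuccs, List.mem_cons, List.not_mem_nil, or_false] at hp
  rcases hp with h | h | h <;> subst h <;> dsimp only [pvDirOK] <;>
    exact ⟨by omega, by omega, by omega, by omega⟩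

lemma step_cost_nonneg (H W : Int) (S : List String) (s : PvState) (c : Int) (t : PvState)
    (h : pvStepR H W S s c t) : 0 ≤ c := by
  obtain ⟨_, cs, hcs, hm⟩ := h
  exact succs_costs cs (bind_costs_shape S s.1 s.2.1 cs hcs) _ _ _ _ (c, t) hm

lemma soundM_getD_le (H W : Int) (S : List String) (m : PvMemo)
    (hs : pvSoundM H W S m) : ∀ u, m.getD u pvINF ≤ pvINF := by
  intro u
  rcases h : m.get? u with _ | v
  · rw [PySem.Dict.getD_of_get?_eq_none m pvINF h]
  · rw [PySem.Dict.getD_of_get?_eq_some m pvINF h]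
    exact le_of_lt (hs u v h).2.1

lemma soundM_getD_nonneg (H W : Int) (S : List String) (m : PvMemo)
    (hs : pvSoundM H W S m) : ∀ u, 0 ≤ m.getD u pvINF := by
  intro u
  rcases h : m.get? u with _ | v
  · rw [PySem.Dict.getD_of_get?_eq_none m pvINF h]; norm_num [pvINF]
  · rw [PySem.Dict.getD_of_get?_eq_some m pvINF h]
    exact (hs u v h).1

lemma oblig_nil_stable (H W : Int) (S : List String) (m : PvMemo)
    (h : pvOblig H W S [] m) : pvStable H W S m := by
  intro s c t hst
  rcases h s c t hst with h1 | ⟨n, hn, _⟩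
  · exact h1
  · exact absurd hn (List.not_mem_nil)

-- ---- the invariant is preserved by a processing step, the potential drops ----
lemma inv_process (H W : Int) (S : List String)
    (q : List PvEntry) (m : PvMemo) (n y x dy dx : Int) (q' : List PvEntry)
    (cs : Int × Int × Int) (q3 : List PvEntry) (m3 : PvMemo)
    (hInv : pvInv H W S q m) (hpop : PvPop q (n, (y, x, dy, dx)) q')
    (hin : pvInField H W y x = true)
    (hcs : (pvLetter S y x).bind pvCosts = some cs)
    (hch : PvRelChain n (pvSuccs cs y x dy dx) q' m q3 m3) :
    pvInv H W S q3 m3 ∧ pvPhi H W q3 m3 < pvPhi H W q m := by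
  obtain ⟨hG, hS, hO⟩ := hInv
  obtain ⟨hmem, hsub, hsplit, hlen⟩ := hpop
  obtain ⟨hn0, hnINF, hdir, hwalk⟩ := hG _ hmem
  have hshape := bind_costs_shape S y x cs hcs
  have hcost : ∀ p ∈ pvSuccs cs y x dy dx, 0 ≤ p.1 := succs_costs cs hshape y x dy dx
  have hboxp : ∀ p ∈ pvSuccs cs y x dy dx, p.2 ∈ pvBox H W := succs_box H W cs y x dy dx hin hdir
  have hdirp := succs_dirOK cs y x dy dx hdir
  have hbm : ∀ u, m.getD u pvINF ≤ pvINF := soundM_getD_le H W S m hS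
  have hbm0 : ∀ u, 0 ≤ m.getD u pvINF := soundM_getD_nonneg H W S m hS
  have hC1 := chain_mono hch
  have hC2 := chain_floor hcost hch
  have hC3 := chain_push_change hch
  have hC4 := chain_post hch
  have hC5 := chain_qmem hch hbm
  have hC6 := chain_store hch hbm
  have hC7 := chain_qsub hch
  have hGood3 : pvGoodQ H W S q3 := by
    intro e he
    rcases hC5 e he with h1 | ⟨p, hp, rfl, hlt⟩
    · exact hG e (hsub e h1)
    · have hcp := hcost p hp
      refine ⟨by omega, hlt, hdirp p hp, ?_⟩
      exact pvWalk.cons hwalk ⟨hin, cs, hcs, by simpa using hp⟩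
  have hSound3 : pvSoundM H W S m3 := by
    intro t v hv
    rcases hC6 t v hv with h1 | ⟨p, hp, hpt, rfl, hlt⟩
    · exact hS t v h1
    · have hcp := hcost p hp
      refine ⟨by omega, hlt, (y, x, dy, dx), n, p.1, hwalk, ⟨hin, cs, hcs, ?_⟩, rfl⟩
      rw [← hpt]; simpa using hp
  have hbm3 : ∀ u, m3.getD u pvINF ≤ pvINF := soundM_getD_le H W S m3 hSound3
  have hbm30 : ∀ u, 0 ≤ m3.getD u pvINF := soundM_getD_nonneg H W S m3 hSound3
  have hlbl_floor : ∀ u, min (pvLbl m u) n ≤ pvLbl m3 u := by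
    intro u; unfold pvLbl
    have h1 := hC2 u
    split_ifs <;> omega
  have hOb3 : pvOblig H W S q3 m3 := by
    intro s1 c1 t1 hst
    have hc1 := step_cost_nonneg H W S s1 c1 t1 hst
    by_cases hs1 : s1 = ((y, x, dy, dx) : PvState)
    · subst hs1
      by_cases hle : n ≤ pvLbl m (y, x, dy, dx)
      · left
        obtain ⟨_, cs', hcs', hmm⟩ := hst
        have hcs2 : (pvLetter S y x).bind pvCosts = some cs' := hcs'
        rw [hcs] at hcs2
        have hcseq : cs' = cs := Option.some_inj.mp hcs2.symm
        subst hcseq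
        have h4 : m3.getD t1 pvINF ≤ n + c1 := hC4 (c1, t1) hmm
        have hfl := hlbl_floor (y, x, dy, dx)
        omega
      · rcases hO _ _ _ hst with h1 | ⟨n2, hn2, hle2⟩
        · left
          have h2 := hC1 t1
          have hfl := hlbl_floor (y, x, dy, dx)
          omega
        · rcases hsplit _ hn2 with heq | hin'
          · exfalso
            have : n2 = n := congrArg Prod.fst heq
            omega
          · refine Or.inr ⟨n2, hC7 _ hin', ?_⟩
            have hfl := hlbl_floor (y, x, dy, dx)
            omega
    · by_cases hchg : m3.getD s1 pvINF = m.getD s1 pvINF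
      · have hlbleq : pvLbl m3 s1 = pvLbl m s1 := by unfold pvLbl; rw [hchg]
        rcases hO _ _ _ hst with h1 | ⟨n2, hn2, hle2⟩
        · left; have h2 := hC1 t1; omega
        · refine Or.inr ⟨n2, ?_, by omega⟩
          rcases hsplit _ hn2 with heq | hin'
          · exact absurd (congrArg Prod.snd heq) hs1
          · exact hC7 _ hin'
      · by_cases hs0 : s1 = pvStart
        · subst hs0
          have hl1 : pvLbl m pvStart = 0 := by
            unfold pvLbl; rw [if_pos rfl]; have := hbm0 pvStart; omega
          have hl2 : pvLbl m3 pvStart = 0 := by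
            unfold pvLbl; rw [if_pos rfl]; have := hbm30 pvStart; omega
          rcases hO _ _ _ hst with h1 | ⟨n2, hn2, hle2⟩
          · left; have h2 := hC1 t1; omega
          · refine Or.inr ⟨n2, ?_, by omega⟩
            rcases hsplit _ hn2 with heq | hin'
            · exact absurd (congrArg Prod.snd heq) hs1
            · exact hC7 _ hin'
        · refine Or.inr ⟨m3.getD s1 pvINF, hC3 s1 hchg, ?_⟩
          unfold pvLbl; rw [if_neg hs0]
          have := hbm3 s1; omega
  have hphi1 : pvPhi H W q3 m3 ≤ pvPhi H W q' m :=
    chain_phi H W hn0 (fun p hp => ⟨hcost p hp, hboxp p hp⟩) hch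
  refine ⟨⟨hGood3, hSound3, hOb3⟩, ?_⟩
  unfold pvPhi at hphi1 ⊢
  omega

lemma inv_skip (H W : Int) (S : List String) (q : List PvEntry) (m : PvMemo)
    (e : PvEntry) (q' : List PvEntry) (hInv : pvInv H W S q m) (hpop : PvPop q e q')
    (hskip : pvInField H W e.2.1 e.2.2.1 = false ∨ m.getD e.2 pvINF < e.1) :
    pvInv H W S q' m ∧ pvPhi H W q' m < pvPhi H W q m := by
  obtain ⟨hG, hS, hO⟩ := hInv
  obtain ⟨hmem, hsub, hsplit, hlen⟩ := hpop
  constructor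
  · refine ⟨fun f hf => hG f (hsub f hf), hS, ?_⟩
    intro s c t hst
    rcases hO s c t hst with h1 | ⟨n2, hn2, hle⟩
    · exact Or.inl h1
    · rcases hsplit _ hn2 with heq | hin'
      · exfalso
        have hs2 : s = e.2 := congrArg Prod.snd heq
        have hn2e : n2 = e.1 := congrArg Prod.fst heq
        rcases hskip with hout | hstale
        · have : pvInField H W e.2.1 e.2.2.1 = true := hs2 ▸ hst.1
          rw [hout] at this; exact Bool.false_ne_true this
        · have h1 : pvLbl m s ≤ m.getD s pvINF := min_le_left _ _
          rw [hs2] at h1 hle; omega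
      · exact Or.inr ⟨n2, hin', hle⟩
  · unfold pvPhi
    omega

-- ---- the runs reach a sound and stable map ----
lemma runA_ends (H W : Int) (S : List String) (hP : Pre_calc_py H W S) :
    ∀ (fuel : Nat) (q : List PvEntry) (m : PvMemo),
      pvInv H W S q m → pvPhi H W q m < fuel → pvEnds H W S (pvRunA H W S fuel q m) := by
  intro fuel
  induction fuel with
  | zero => intro q m _ h; exact absurd h (Nat.not_lt_zero _)
  | succ f ih =>
    intro q m hInv hphi
    rcases q with _ | ⟨⟨n, y, x, dy, dx⟩, rest⟩
    · simp only [pvRunA]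
      exact ⟨oblig_nil_stable H W S m hInv.2.2, hInv.2.1⟩
    · by_cases hin : pvInField H W y x = true
      · obtain ⟨cs, hcs, _⟩ := pre_letter H W S hP y x hin
        have hred : pvRunA H W S (f + 1) ((n, y, x, dy, dx) :: rest) m =
            pvRunA H W S f (pvRelax3A rest m n cs y x dy dx).1
              (pvRelax3A rest m n cs y x dy dx).2 := by
          simp [pvRunA, hin, hcs]
        rw [hred]
        obtain ⟨hI, hp⟩ := inv_process H W S ((n, y, x, dy, dx) :: rest) m n y x dy dx rest
          cs _ _ ⟨hInv.1, hInv.2.1, hInv.2.2⟩ (pvPop_head _ _) hin hcs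
          (pvChainA n cs y x dy dx rest m)
        exact ih _ _ hI (by omega)
      · have hin' : pvInField H W y x = false := by simpa using hin
        have hred : pvRunA H W S (f + 1) ((n, y, x, dy, dx) :: rest) m =
            pvRunA H W S f rest m := by
          simp [pvRunA, hin']
        rw [hred]
        obtain ⟨hI, hp⟩ := inv_skip H W S ((n, y, x, dy, dx) :: rest) m (n, (y, x, dy, dx))
          rest hInv (pvPop_head _ _) (Or.inl hin')
        exact ih _ _ hI (by omega)

lemma runB_ends (H W : Int) (S : List String) (hP : Pre_calc_py H W S) :
    ∀ (fuel : Nat) (q : List PvEntry) (m : PvMemo),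
      pvInv H W S q m → pvPhi H W q m < fuel → pvEnds H W S (pvRunB H W S fuel q m) := by
  intro fuel
  induction fuel with
  | zero => intro q m _ h; exact absurd h (Nat.not_lt_zero _)
  | succ f ih =>
    intro q m hInv hphi
    rcases q with _ | ⟨e, rest⟩
    · simp only [pvRunB]
      exact ⟨oblig_nil_stable H W S m hInv.2.2, hInv.2.1⟩
    · have hpop := pvPop_min e rest
      by_cases hin : pvInField H W (pvMinEntry e rest).2.1 (pvMinEntry e rest).2.2.1 = true
      · by_cases hstale : m.getD (pvMinEntry e rest).2 pvINF < (pvMinEntry e rest).1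
        · have hred : pvRunB H W S (f + 1) (e :: rest) m =
              pvRunB H W S f ((e :: rest).erase (pvMinEntry e rest)) m := by
            simp [pvRunB, hin, hstale]
          rw [hred]
          obtain ⟨hI, hp⟩ := inv_skip H W S (e :: rest) m (pvMinEntry e rest)
            ((e :: rest).erase (pvMinEntry e rest)) hInv hpop (Or.inr hstale)
          exact ih _ _ hI (by omega)
        · obtain ⟨cs, hcs, _⟩ := pre_letter H W S hP (pvMinEntry e rest).2.1
            (pvMinEntry e rest).2.2.1 hin
          have hred : pvRunB H W S (f + 1) (e :: rest) m =
              pvRunB H W S f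
                ((pvSuccs cs (pvMinEntry e rest).2.1 (pvMinEntry e rest).2.2.1
                    (pvMinEntry e rest).2.2.2.1 (pvMinEntry e rest).2.2.2.2).foldl
                  (pvRelaxB (pvMinEntry e rest).1) ((e :: rest).erase (pvMinEntry e rest), m)).1
                ((pvSuccs cs (pvMinEntry e rest).2.1 (pvMinEntry e rest).2.2.1
                    (pvMinEntry e rest).2.2.2.1 (pvMinEntry e rest).2.2.2.2).foldl
                  (pvRelaxB (pvMinEntry e rest).1) ((e :: rest).erase (pvMinEntry e rest), m)).2 := by
            simp [pvRunB, hin, hstale, hcs]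
          rw [hred]
          obtain ⟨hI, hp⟩ := inv_process H W S (e :: rest) m (pvMinEntry e rest).1
            (pvMinEntry e rest).2.1 (pvMinEntry e rest).2.2.1 (pvMinEntry e rest).2.2.2.1
            (pvMinEntry e rest).2.2.2.2 ((e :: rest).erase (pvMinEntry e rest)) cs _ _
            hInv hpop hin hcs
            (pvChainB (pvMinEntry e rest).1 cs (pvMinEntry e rest).2.1
              (pvMinEntry e rest).2.2.1 (pvMinEntry e rest).2.2.2.1
              (pvMinEntry e rest).2.2.2.2 ((e :: rest).erase (pvMinEntry e rest)) m)
          exact ih _ _ hI (by omega)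
      · have hin' : pvInField H W (pvMinEntry e rest).2.1 (pvMinEntry e rest).2.2.1 = false := by
          simpa using hin
        have hred : pvRunB H W S (f + 1) (e :: rest) m =
            pvRunB H W S f ((e :: rest).erase (pvMinEntry e rest)) m := by
          simp [pvRunB, hin']
        rw [hred]
        obtain ⟨hI, hp⟩ := inv_skip H W S (e :: rest) m (pvMinEntry e rest)
          ((e :: rest).erase (pvMinEntry e rest)) hInv hpop (Or.inl hin')
        exact ih _ _ hI (by omega)

-- ---- uniqueness of sound+stable maps ----
lemma stable_le_walk (H W : Int) (S : List String) (m : PvMemo) (hst : pvStable H W S m) :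
    ∀ t nn, pvWalk H W S t nn → pvLbl m t ≤ nn := by
  intro t nn hw
  induction hw with
  | nil =>
    have h0 : pvLbl m pvStart ≤ 0 := by
      unfold pvLbl; rw [if_pos rfl]; exact min_le_right _ _
    exact h0
  | @cons s n c t' hw hstep ih =>
    have hm := hst s c t' hstep
    have h1 : pvLbl m t' ≤ m.getD t' pvINF := min_le_left _ _
    omega

lemma ends_getD_le (H W : Int) (S : List String) (m1 m2 : PvMemo)
    (h1 : pvEnds H W S m1) (h2 : pvEnds H W S m2) (t : PvState) :
    m1.getD t pvINF ≤ m2.getD t pvINF := by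
  rcases hv : m2.get? t with _ | v
  · rw [PySem.Dict.getD_of_get?_eq_none m2 pvINF hv]
    exact soundM_getD_le H W S m1 h1.2 t
  · rw [PySem.Dict.getD_of_get?_eq_some m2 pvINF hv]
    obtain ⟨_, _, s, n, c, hw, hstep, rfl⟩ := h2.2 t v hv
    have ha := h1.1 s c t hstep
    have hb := stable_le_walk H W S m1 h1.1 s n hw
    omega

-- ---- initial configuration ----
lemma inv_init (H W : Int) (S : List String) :
    pvInv H W S [(0, pvStart)] PySem.Dict.empty := by
  refine ⟨?_, ?_, ?_⟩
  · intro e he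
    simp only [List.mem_cons, List.not_mem_nil, or_false] at he
    subst he
    exact ⟨le_refl _, by norm_num [pvINF],
      show (-1 : Int) ≤ 0 ∧ (0:Int) ≤ 1 ∧ (-1:Int) ≤ 1 ∧ (1:Int) ≤ 1 by norm_num,
      pvWalk.nil⟩
  · intro t v hv
    rw [PySem.Dict.get?_empty] at hv
    exact absurd hv (by simp)
  · intro s c t hst
    have hc := step_cost_nonneg H W S s c t hst
    by_cases hs0 : s = pvStart
    · subst hs0
      refine Or.inr ⟨0, List.mem_cons_self, ?_⟩
      unfold pvLbl
      rw [if_pos rfl, PySem.Dict.getD_empty]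
      norm_num [pvINF]
    · left
      rw [PySem.Dict.getD_empty]
      unfold pvLbl
      rw [if_neg hs0, PySem.Dict.getD_empty]
      omega

lemma phi_init (H W : Int) :
    pvPhi H W [(0, pvStart)] PySem.Dict.empty < pvFuel H W := by
  unfold pvPhi pvFuel
  simp only [PySem.Dict.getD_empty, Finset.sum_const, smul_eq_mul, List.length_cons,
    List.length_nil]
  have hc : (pvBox H W).card = (H + 2).toNat * ((W + 2).toNat * 9) := by
    unfold pvBox
    simp only [Finset.card_product, Int.card_Icc]
    have e1 : H + 1 - (-1) = H + 2 := by ring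
    have e2 : W + 1 - (-1) = W + 2 := by ring
    have e3 : (1 : Int) + 1 - (-1) = 3 := by norm_num
    rw [e1, e2, e3]
    have h3 : ((3:Int)).toNat = 3 := rfl
    rw [h3]
    try ring
  rw [hc]
  have hINF : pvINF.toNat = 1000000 := rfl
  rw [hINF]
  have : (H + 2).toNat * ((W + 2).toNat * 9) * 1000000 =
      9 * (H + 2).toNat * (W + 2).toNat * 1000000 := by ring
  rw [this]
  omega

-- ===== VERDICT (by name: the statement is the Claim_ definition above) =====
theorem calc_py_spec : Claim_equal_calc_py := by
  intro H W S _hD hP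
  unfold Spec_calc_py calc_py calc_py_alt
  have hA := runA_ends H W S hP (pvFuel H W) _ _ (inv_init H W S) (phi_init H W)
  have hB := runB_ends H W S hP (pvFuel H W) _ _ (inv_init H W S) (phi_init H W)
  exact le_antisymm (ends_getD_le H W S _ _ hA hB _) (ends_getD_le H W S _ _ hB hA _)
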